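-- pv_equiv track=rewrite | github.com/awslabs/typecart | scripts/countVerified.py | process_dafny_output
-- ===== SOURCE A (Python) =====
-- def process_dafny_output(lines):
--     functions = {}
--     current_function = None
--     current_category = None
--
--     for line in lines:
--         if "Verifying " in line:
--             parts = line.split(' ', 2)
--             current_function = parts[1]
--             current_category = parts[2].strip("() ...")
--             if current_function.endswith("_bc"):
--                 functions.setdefault(current_function, {})[current_category] = 'unverified'
--         elif "verified" in line and current_function and current_category:
--             if current_function.endswith("_bc"):
--                 functions[current_function][current_category] = 'verified'
--             current_function = None
--             current_category = None
--         elif "error" in line and current_function and current_category: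
--             if current_function.endswith("_bc"):
--                 functions[current_function][current_category] = 'error'
--             current_function = None
--             current_category = None
--         elif "timed out" in line and current_function and current_category:
--             if current_function.endswith("_bc"):
--                 functions[current_function][current_category] = 'timed out'
--             current_function = None
--             current_category = None
--
--     verified_functions = {k: [c for c, v in categories.items() if v == 'verified'] for k, categories in functions.items() if all(v == 'verified' for v in categories.values())}
--     unverified_functions = {k: [c for c, v in categories.items() if v == 'error'] for k, categories in functions.items() if any(v == 'error' for v in categories.values())}
--     timed_out_functions = {k: [c for c, v in categories.items() if v == 'timed out'] for k, categories in functions.items() if any(v == 'timed out' for v in categories.values())}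
--
--     return verified_functions, unverified_functions, timed_out_functions
-- ===== SOURCE B (Python) =====
-- def _events(lines):
--     # Parse pass: emit an append-only log of (function, category, status) assignments.
--     pending = None
--     for line in lines:
--         if "Verifying " in line:
--             parts = line.split(' ', 2)
--             pending = (parts[1], parts[2].strip("() ..."))
--             if pending[0].endswith("_bc"):
--                 yield (pending[0], pending[1], 'unverified')
--         else:
--             status = ("verified" if "verified" in line else
--                       "error" if "error" in line else
--                       "timed out" if "timed out" in line else None)
--             if status is not None and pending is not None and pending[0] and pending[1]:
--                 if pending[0].endswith("_bc"):
--                     yield (pending[0], pending[1], status)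
--                 pending = None
--
--
-- def _last_status(events, name, cat):
--     # Final status of (name, cat) = last assignment in the log.
--     for n, c, s in reversed(events):
--         if n == name and c == cat:
--             return s
--
--
-- def process_dafny_output(lines):
--     events = list(_events(lines))
--     names = list(dict.fromkeys(n for n, _, _ in events))
--     verified_functions, unverified_functions, timed_out_functions = {}, {}, {}
--     for name in names:
--         cats = list(dict.fromkeys(c for n, c, _ in events if n == name))
--         vs = [c for c in cats if _last_status(events, name, c) == 'verified']
--         es = [c for c in cats if _last_status(events, name, c) == 'error']
--         ts = [c for c in cats if _last_status(events, name, c) == 'timed out']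
--         if len(vs) == len(cats):
--             verified_functions[name] = vs
--         if es:
--             unverified_functions[name] = es
--         if ts:
--             timed_out_functions[name] = ts
--     return verified_functions, unverified_functions, timed_out_functions
-- ===== Notes on version B (the rewrite author's own statement) =====
-- stated objective: alternative
-- what changed: B replaces A's mutable nested dict: the parse pass emits an append-only log of (function, category, status) assignment events, and the result is reconstructed from the log afterwards — names and categories by ordered first-occurrence dedup (dict.fromkeys) and each final status by a last-write-wins backward scan of the log — instead of A's in-place dict-of-dicts updates followed by three dict comprehensions.
import Mathlib
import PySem

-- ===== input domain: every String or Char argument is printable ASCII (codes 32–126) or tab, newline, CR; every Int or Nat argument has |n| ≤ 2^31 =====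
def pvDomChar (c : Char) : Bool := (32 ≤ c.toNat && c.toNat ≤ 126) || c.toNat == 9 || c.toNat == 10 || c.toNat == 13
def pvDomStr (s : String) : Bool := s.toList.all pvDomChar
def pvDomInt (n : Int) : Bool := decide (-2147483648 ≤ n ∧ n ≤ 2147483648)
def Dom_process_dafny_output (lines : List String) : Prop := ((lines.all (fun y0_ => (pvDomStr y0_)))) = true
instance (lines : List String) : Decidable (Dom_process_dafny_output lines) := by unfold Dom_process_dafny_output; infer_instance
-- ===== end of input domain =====

-- B replaces A's mutable nested dict with an append-only log of (function, category, status)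
-- assignment events emitted by the parse pass; the three result dicts are reconstructed from the
-- log afterwards (ordered first-occurrence dedup for names/categories, last-write-wins backward
-- scan for each final status). Objective: alternative data structure, same results.

-- ===== PORT A =====
def pvTruthy (o : Option String) : Bool :=
  match o with
  | none => false
  | some s => !(s == "")

def pvAUpd (fns : PySem.Dict String (PySem.Dict String String)) (f c s : String) :
    PySem.Dict String (PySem.Dict String String) :=
  if PySem.Str.endswith f "_bc" then
    fns.modify f PySem.Dict.empty (fun inner => inner.insert c s)
  else fns

def pvAStep (st : PySem.Dict String (PySem.Dict String String) × Option String × Option String)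
    (line : String) :
    PySem.Dict String (PySem.Dict String String) × Option String × Option String :=
  if PySem.Str.isIn "Verifying " line then
    let parts := (PySem.Str.splitMax? line " " 2).getD []
    let name := (PySem.List.pyGet? parts 1).getD ""
    let cat := PySem.Str.stripChars ((PySem.List.pyGet? parts 2).getD "") "() ..."
    let fns := if PySem.Str.endswith name "_bc" then
        (st.1.setdefault name PySem.Dict.empty).modify name PySem.Dict.empty
          (fun inner => inner.insert cat "unverified")
      else st.1
    (fns, some name, some cat)
  else if PySem.Str.isIn "verified" line && pvTruthy st.2.1 && pvTruthy st.2.2 then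
    (pvAUpd st.1 (st.2.1.getD "") (st.2.2.getD "") "verified", none, none)
  else if PySem.Str.isIn "error" line && pvTruthy st.2.1 && pvTruthy st.2.2 then
    (pvAUpd st.1 (st.2.1.getD "") (st.2.2.getD "") "error", none, none)
  else if PySem.Str.isIn "timed out" line && pvTruthy st.2.1 && pvTruthy st.2.2 then
    (pvAUpd st.1 (st.2.1.getD "") (st.2.2.getD "") "timed out", none, none)
  else st

def process_dafny_output (lines : List String) :
    (List (String × List String)) × (List (String × List String)) × (List (String × List String)) :=
  let st := lines.foldl pvAStep (PySem.Dict.empty, none, none)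
  let fns := st.1
  ((fns.items.filter (fun p => p.2.values.all (fun v => v == "verified"))).map
      (fun p => (p.1, (p.2.items.filter (fun q => q.2 == "verified")).map Prod.fst)),
   (fns.items.filter (fun p => p.2.values.any (fun v => v == "error"))).map
      (fun p => (p.1, (p.2.items.filter (fun q => q.2 == "error")).map Prod.fst)),
   (fns.items.filter (fun p => p.2.values.any (fun v => v == "timed out"))).map
      (fun p => (p.1, (p.2.items.filter (fun q => q.2 == "timed out")).map Prod.fst)))

-- ===== PORT B =====
-- parse pass of Source B (_events): emits the append-only log of (function, category, status) events
def pvBStatusOf (line : String) : Option String :=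
  if PySem.Str.isIn "verified" line then some "verified"
  else if PySem.Str.isIn "error" line then some "error"
  else if PySem.Str.isIn "timed out" line then some "timed out"
  else none

def pvBStep (st : List (String × String × String) × Option (String × String)) (line : String) :
    List (String × String × String) × Option (String × String) :=
  if PySem.Str.isIn "Verifying " line then
    let parts := (PySem.Str.splitMax? line " " 2).getD []
    let name := (PySem.List.pyGet? parts 1).getD ""
    let cat := PySem.Str.stripChars ((PySem.List.pyGet? parts 2).getD "") "() ..."
    (if PySem.Str.endswith name "_bc" then st.1 ++ [(name, cat, "unverified")] else st.1,
     some (name, cat))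
  else
    match pvBStatusOf line, st.2 with
    | some s, some pc =>
      if !(pc.1 == "") && !(pc.2 == "") then
        (if PySem.Str.endswith pc.1 "_bc" then st.1 ++ [(pc.1, pc.2, s)] else st.1, none)
      else st
    | _, _ => st

-- _last_status of Source B: last assignment in the log ("" stands for Python's None return, which the
-- status comparisons also never match; a scanned category always occurs in the log)
def pvLastStatus (log : List (String × String × String)) (name cat : String) : String :=
  ((log.reverse.find? (fun e => e.1 == name && e.2.1 == cat)).map (fun e => e.2.2)).getD ""

def process_dafny_output_alt (lines : List String) :
    (List (String × List String)) × (List (String × List String)) × (List (String × List String)) :=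
  let log := (lines.foldl pvBStep ([], none)).1
  let names := PySem.List.dedup (log.map (·.1))
  names.foldl (fun acc name =>
    let cats := PySem.List.dedup ((log.filter (fun e => e.1 == name)).map (fun e => e.2.1))
    let vs := cats.filter (fun c => pvLastStatus log name c == "verified")
    let es := cats.filter (fun c => pvLastStatus log name c == "error")
    let ts := cats.filter (fun c => pvLastStatus log name c == "timed out")
    ((if vs.length == cats.length then acc.1 ++ [(name, vs)] else acc.1),
     (if !es.isEmpty then acc.2.1 ++ [(name, es)] else acc.2.1),
     (if !ts.isEmpty then acc.2.2 ++ [(name, ts)] else acc.2.2))) ([], [], [])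

-- ===== PRECONDITION & SPEC =====
-- Pre_ excludes exactly the lines on which Python A raises IndexError: a line containing
-- "Verifying " but with fewer than two spaces, so that line.split(' ', 2) has no parts[2].
def Pre_process_dafny_output (lines : List String) : Prop :=
  ∀ line ∈ lines, PySem.Str.isIn "Verifying " line = true → 2 ≤ PySem.Str.count line " "
instance (lines : List String) : Decidable (Pre_process_dafny_output lines) := by
  unfold Pre_process_dafny_output; infer_instance

def pvWitness_process_dafny_output : List String :=
  ["Verifying foo_bc (assertion) ...", "verified"]

def Spec_process_dafny_output (lines : List String)
    (out : (List (String × List String)) × (List (String × List String)) × (List (String × List String))) : Prop :=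
  out = process_dafny_output_alt lines
instance (lines : List String)
    (out : (List (String × List String)) × (List (String × List String)) × (List (String × List String))) :
    Decidable (Spec_process_dafny_output lines out) := by
  unfold Spec_process_dafny_output; infer_instance

-- ===== CLAIM (what is proved, stated in full; the proofs are below) =====
def Claim_equal_process_dafny_output : Prop :=
  ∀ (lines : List String), Dom_process_dafny_output lines → Pre_process_dafny_output lines →
    Spec_process_dafny_output lines (process_dafny_output lines)

-- ===== LEMMAS AND PROOFS =====

-- A's dict-of-dicts, rebuilt from B's event log
def pvLogUpd (d : PySem.Dict String (PySem.Dict String String)) (e : String × String × String) :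
    PySem.Dict String (PySem.Dict String String) :=
  d.modify e.1 PySem.Dict.empty (fun inner => inner.insert e.2.1 e.2.2)

def pvDictOfLog (log : List (String × String × String)) :
    PySem.Dict String (PySem.Dict String String) :=
  log.foldl pvLogUpd PySem.Dict.empty

theorem pvSetdefModify {ν : Type} (d : PySem.Dict String ν) (k : String) (v0 : ν) (f : ν → ν) :
    (d.setdefault k v0).modify k v0 f = d.modify k v0 f := by
  have h1 : d.modify k v0 f = d.insert k (f (d.getD k v0)) := rfl
  have h2 : (d.setdefault k v0).modify k v0 f
      = (d.setdefault k v0).insert k (f ((d.setdefault k v0).getD k v0)) := rfl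
  rw [h1, h2, PySem.Dict.getD_setdefault_self]
  by_cases hc : d.contains k = true
  · rw [PySem.Dict.setdefault_of_contains d v0 hc]
  · rw [PySem.Dict.setdefault_of_not_contains d v0 (by simpa using hc),
      PySem.Dict.insert_insert_self]

-- state correspondence between A's (functions, current_function, current_category)
-- and B's (log, pending)
def pvRel (sA : PySem.Dict String (PySem.Dict String String) × Option String × Option String)
    (sB : List (String × String × String) × Option (String × String)) : Prop :=
  sA.1 = pvDictOfLog sB.1 ∧ ((sA.2.1 = none ∧ sA.2.2 = none ∧ sB.2 = none) ∨
    (∃ a c, sA.2.1 = some a ∧ sA.2.2 = some c ∧ sB.2 = some (a, c)))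

theorem pvDictOfLog_append (log : List (String × String × String)) (e : String × String × String) :
    pvDictOfLog (log ++ [e]) = pvLogUpd (pvDictOfLog log) e := by
  simp [pvDictOfLog]

theorem pvRel_step (sA : PySem.Dict String (PySem.Dict String String) × Option String × Option String)
    (sB : List (String × String × String) × Option (String × String)) (line : String)
    (h : pvRel sA sB) : pvRel (pvAStep sA line) (pvBStep sB line) := by
  obtain ⟨hd, hs⟩ := h
  cases hv : PySem.Str.isIn "Verifying " line with
  | true =>
    refine ⟨?_, Or.inr ⟨(PySem.List.pyGet? ((PySem.Str.splitMax? line " " 2).getD []) 1).getD "",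
      PySem.Str.stripChars ((PySem.List.pyGet? ((PySem.Str.splitMax? line " " 2).getD []) 2).getD "") "() ...",
      ?_, ?_, ?_⟩⟩ <;>
    · simp only [pvAStep, pvBStep, hv]
      split_ifs with hbc <;>
        simp [hd, pvDictOfLog_append, pvLogUpd, pvSetdefModify]
  | false =>
    rcases hs with ⟨h1, h2, h3⟩ | ⟨a, c, h1, h2, h3⟩
    · have hA : pvAStep sA line = sA := by
        simp only [pvAStep, pvTruthy, hv, h1, h2]
        simp
      have hB : pvBStep sB line = sB := by
        simp only [pvBStep, hv, h3]
        cases hst : pvBStatusOf line <;> simp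
      rw [hA, hB]; exact ⟨hd, Or.inl ⟨h1, h2, h3⟩⟩
    · by_cases hac : a = "" ∨ c = ""
      · have hA : pvAStep sA line = sA := by
          simp only [pvAStep, pvTruthy, hv, h1, h2]
          rcases hac with ha | hc
          · simp [ha]
          · simp [hc]
        have hB : pvBStep sB line = sB := by
          simp only [pvBStep, hv, h3]
          cases hst : pvBStatusOf line <;>
            · rcases hac with ha | hc
              · simp [ha]
              · simp [hc]
        rw [hA, hB]; exact ⟨hd, Or.inr ⟨a, c, h1, h2, h3⟩⟩
      · push Not at hac
        obtain ⟨ha, hc⟩ := hac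
        cases w1 : PySem.Str.isIn "verified" line with
        | true =>
          have hA : pvAStep sA line = (pvAUpd sA.1 a c "verified", none, none) := by
            simp only [pvAStep, pvTruthy, hv, w1, h1, h2]
            simp [ha, hc]
          have hB : pvBStep sB line
              = (if PySem.Str.endswith a "_bc" then sB.1 ++ [(a, c, "verified")] else sB.1,
                 none) := by
            simp only [pvBStep, pvBStatusOf, hv, w1, h3]
            simp [ha, hc]
          rw [hA, hB]
          refine ⟨?_, Or.inl ⟨rfl, rfl, rfl⟩⟩
          simp only [pvAUpd, hd]
          split_ifs with hbc
          · simp [pvDictOfLog_append, pvLogUpd]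
          · rfl
        | false =>
          cases w2 : PySem.Str.isIn "error" line with
          | true =>
            have hA : pvAStep sA line = (pvAUpd sA.1 a c "error", none, none) := by
              simp only [pvAStep, pvTruthy, hv, w1, w2, h1, h2]
              simp [ha, hc]
            have hB : pvBStep sB line
                = (if PySem.Str.endswith a "_bc" then sB.1 ++ [(a, c, "error")] else sB.1,
                   none) := by
              simp only [pvBStep, pvBStatusOf, hv, w1, w2, h3]
              simp [ha, hc]
            rw [hA, hB]
            refine ⟨?_, Or.inl ⟨rfl, rfl, rfl⟩⟩
            simp only [pvAUpd, hd]
            split_ifs with hbc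
            · simp [pvDictOfLog_append, pvLogUpd]
            · rfl
          | false =>
            cases w3 : PySem.Str.isIn "timed out" line with
            | true =>
              have hA : pvAStep sA line = (pvAUpd sA.1 a c "timed out", none, none) := by
                simp only [pvAStep, pvTruthy, hv, w1, w2, w3, h1, h2]
                simp [ha, hc]
              have hB : pvBStep sB line
                  = (if PySem.Str.endswith a "_bc" then sB.1 ++ [(a, c, "timed out")] else sB.1,
                     none) := by
                simp only [pvBStep, pvBStatusOf, hv, w1, w2, w3, h3]
                simp [ha, hc]
              rw [hA, hB]
              refine ⟨?_, Or.inl ⟨rfl, rfl, rfl⟩⟩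
              simp only [pvAUpd, hd]
              split_ifs with hbc
              · simp [pvDictOfLog_append, pvLogUpd]
              · rfl
            | false =>
              have hA : pvAStep sA line = sA := by
                simp only [pvAStep, hv, w1, w2, w3]
                simp
              have hB : pvBStep sB line = sB := by
                simp only [pvBStep, pvBStatusOf, hv, w1, w2, w3]
                simp
              rw [hA, hB]; exact ⟨hd, Or.inr ⟨a, c, h1, h2, h3⟩⟩

theorem pvRel_foldl (lines : List String) (sA : _) (sB : _) (h : pvRel sA sB) :
    pvRel (lines.foldl pvAStep sA) (lines.foldl pvBStep sB) := by
  induction lines generalizing sA sB with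
  | nil => exact h
  | cons l ls ih => exact ih _ _ (pvRel_step _ _ l h)

-- the inner dict of a function, rebuilt from its part of the log
def pvInnerOf (cfs : List (String × String × String)) : PySem.Dict String String :=
  cfs.foldl (fun i e => i.insert e.2.1 e.2.2) PySem.Dict.empty

theorem pvGetD_dictfold (log : List (String × String × String))
    (d : PySem.Dict String (PySem.Dict String String)) (n : String) :
    (log.foldl pvLogUpd d).getD n PySem.Dict.empty
      = (log.filter (fun e => e.1 == n)).foldl (fun i e => i.insert e.2.1 e.2.2)
          (d.getD n PySem.Dict.empty) := by
  induction log generalizing d with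
  | nil => simp
  | cons e rest ih =>
    rw [List.foldl_cons, ih]
    by_cases he : e.1 = n
    · simp [pvLogUpd, he]
    · rw [List.filter_cons_of_neg (by simpa using he)]
      simp [pvLogUpd, PySem.Dict.getD_modify, Ne.symm he]

theorem pvKeys_dictOfLog (log : List (String × String × String)) :
    (pvDictOfLog log).keys = PySem.Set.ofList (log.map (·.1)) := by
  have h := PySem.Dict.keys_foldl_modify_key log (fun e => e.1) PySem.Dict.empty
    (fun _ e inner => inner.insert e.2.1 e.2.2) PySem.Dict.empty
  simpa [pvDictOfLog, pvLogUpd, PySem.Set.update_nil_left] using h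

theorem pvNodup_keys_dictOfLog (log : List (String × String × String)) :
    (pvDictOfLog log).keys.Nodup := by
  rw [pvKeys_dictOfLog]; exact PySem.Set.nodup_ofList _

theorem pvItems_dictOfLog (log : List (String × String × String)) :
    (pvDictOfLog log).items
      = (PySem.List.dedup (log.map (·.1))).map
          (fun n => (n, pvInnerOf (log.filter (fun e => e.1 == n)))) := by
  rw [PySem.Dict.items_eq_map_keys (pvDictOfLog log) (pvNodup_keys_dictOfLog log) PySem.Dict.empty,
    pvKeys_dictOfLog]
  refine List.map_congr_left (fun n _ => ?_)
  have := pvGetD_dictfold log PySem.Dict.empty n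
  simp only [pvDictOfLog] at this ⊢
  rw [this]
  simp [pvInnerOf]

-- find? over a filtered list (specific combination used below)
theorem pvFind?_filter {α : Type} (l : List α) (p q : α → Bool) :
    (l.filter p).find? q = l.find? (fun a => p a && q a) := by
  induction l with
  | nil => rfl
  | cons x xs ih =>
    by_cases hp : p x = true
    · by_cases hq : q x = true
      · simp [hp, hq]
      · simp [hp, hq, ih]
    · simp [hp, ih]

theorem pvGet?_insfold (cfs : List (String × String × String)) (d : PySem.Dict String String)
    (c : String) :
    (cfs.foldl (fun i e => i.insert e.2.1 e.2.2) d).get? c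
      = ((cfs.reverse.find? (fun e => e.2.1 == c)).map (fun e => e.2.2)).or (d.get? c) := by
  induction cfs generalizing d with
  | nil => simp
  | cons e rest ih =>
    rw [List.foldl_cons, ih, List.reverse_cons, List.find?_append]
    cases hf : rest.reverse.find? (fun e => e.2.1 == c) with
    | some w => simp
    | none =>
      by_cases he : e.2.1 = c
      · simp [he, PySem.Dict.get?_insert_self]
      · simp [he, PySem.Dict.get?_insert_of_ne _ _ (Ne.symm he)]

theorem pvKeys_innerOf (cfs : List (String × String × String)) :
    (pvInnerOf cfs).keys = PySem.Set.ofList (cfs.map (fun e => e.2.1)) := by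
  have h := PySem.Dict.keys_foldl_insert_key cfs (fun e => e.2.1)
    (fun _ e => e.2.2) PySem.Dict.empty
  simpa [pvInnerOf, PySem.Set.update_nil_left] using h

theorem pvNodup_keys_innerOf (cfs : List (String × String × String)) :
    (pvInnerOf cfs).keys.Nodup := by
  rw [pvKeys_innerOf]; exact PySem.Set.nodup_ofList _

theorem pvItems_innerOf (cfs : List (String × String × String)) :
    (pvInnerOf cfs).items
      = (PySem.List.dedup (cfs.map (fun e => e.2.1))).map
          (fun c => (c, ((cfs.reverse.find? (fun e => e.2.1 == c)).map (fun e => e.2.2)).getD "")) := by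
  rw [PySem.Dict.items_eq_map_keys (pvInnerOf cfs) (pvNodup_keys_innerOf cfs) "",
    pvKeys_innerOf]
  refine List.map_congr_left (fun c _ => ?_)
  rw [PySem.Dict.getD_eq_get?_getD]
  unfold pvInnerOf
  rw [pvGet?_insfold]
  cases hf : cfs.reverse.find? (fun e => e.2.1 == c) <;> simp

theorem pvLastStatus_filter (log : List (String × String × String)) (n c : String) :
    ((((log.filter (fun e => e.1 == n)).reverse.find? (fun e => e.2.1 == c)).map
        (fun e => e.2.2)).getD "")
      = pvLastStatus log n c := by
  rw [← List.filter_reverse, pvFind?_filter, pvLastStatus]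

-- generic shape of B's single output-building loop
theorem pvTripleFold_go (names : List String) (p q r : String → Bool)
    (f g h : String → List String)
    (acc : (List (String × List String)) × (List (String × List String)) × (List (String × List String))) :
    names.foldl (fun acc n =>
      ((if p n then acc.1 ++ [(n, f n)] else acc.1),
       (if q n then acc.2.1 ++ [(n, g n)] else acc.2.1),
       (if r n then acc.2.2 ++ [(n, h n)] else acc.2.2))) acc
    = (acc.1 ++ (names.filter p).map (fun n => (n, f n)),
       acc.2.1 ++ (names.filter q).map (fun n => (n, g n)),
       acc.2.2 ++ (names.filter r).map (fun n => (n, h n))) := by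
  induction names generalizing acc with
  | nil => simp
  | cons n ns ih =>
    rw [List.foldl_cons, ih]
    simp only [List.filter_cons, Prod.mk.injEq]
    refine ⟨?_, ?_, ?_⟩ <;>
    · split_ifs with hcond <;> simp

-- per-function classification facts, on a dict whose items are cats paired with their status
theorem pvAll_values (cats : List String) (st : String → String) (s : String)
    (d : PySem.Dict String String) (hitems : d.items = cats.map (fun c => (c, st c))) :
    d.values.all (fun v => v == s) = ((cats.filter (fun c => st c == s)).length == cats.length) := by
  have hv : d.values = cats.map st := by
    simp [PySem.Dict.values, hitems, List.map_map, Function.comp]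
  rw [hv, Bool.eq_iff_iff]
  simp only [List.all_map, List.all_eq_true, Function.comp, beq_iff_eq]
  rw [← List.countP_eq_length_filter, List.countP_eq_length]
  simp

theorem pvAny_values (cats : List String) (st : String → String) (s : String)
    (d : PySem.Dict String String) (hitems : d.items = cats.map (fun c => (c, st c))) :
    d.values.any (fun v => v == s) = !(cats.filter (fun c => st c == s)).isEmpty := by
  have hv : d.values = cats.map st := by
    simp [PySem.Dict.values, hitems, List.map_map, Function.comp]
  rw [hv, Bool.eq_iff_iff]
  simp only [List.any_map, List.any_eq_true, Function.comp, beq_iff_eq,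
    Bool.not_eq_eq_eq_not, Bool.not_true, List.isEmpty_eq_false_iff, ne_eq,
    List.filter_eq_nil_iff]
  push Not
  simp

theorem pvFilter_items (cats : List String) (st : String → String) (s : String)
    (d : PySem.Dict String String) (hitems : d.items = cats.map (fun c => (c, st c))) :
    (d.items.filter (fun q => q.2 == s)).map Prod.fst = cats.filter (fun c => st c == s) := by
  rw [hitems]
  simp [List.filter_map, List.map_map, Function.comp_def]

-- ===== VERDICT (by name: the statement is the Claim_ definition above) =====
theorem process_dafny_output_spec : Claim_equal_process_dafny_output := by
  intro lines _ _
  unfold Spec_process_dafny_output process_dafny_output process_dafny_output_alt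
  have hrel := pvRel_foldl lines (PySem.Dict.empty, none, none) ([], none)
    ⟨rfl, Or.inl ⟨rfl, rfl, rfl⟩⟩
  set log := (lines.foldl pvBStep ([], none)).1 with hlog
  have hfns : (lines.foldl pvAStep (PySem.Dict.empty, none, none)).1 = pvDictOfLog log := hrel.1
  dsimp only
  rw [hfns, pvItems_dictOfLog]
  -- rewrite B's loop
  rw [pvTripleFold_go (PySem.List.dedup (log.map (·.1)))
    (p := fun n => ((PySem.List.dedup ((log.filter (fun e => e.1 == n)).map (fun e => e.2.1))).filter
        (fun c => pvLastStatus log n c == "verified")).length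
        == (PySem.List.dedup ((log.filter (fun e => e.1 == n)).map (fun e => e.2.1))).length)
    (q := fun n => !((PySem.List.dedup ((log.filter (fun e => e.1 == n)).map (fun e => e.2.1))).filter
        (fun c => pvLastStatus log n c == "error")).isEmpty)
    (r := fun n => !((PySem.List.dedup ((log.filter (fun e => e.1 == n)).map (fun e => e.2.1))).filter
        (fun c => pvLastStatus log n c == "timed out")).isEmpty)
    (f := fun n => (PySem.List.dedup ((log.filter (fun e => e.1 == n)).map (fun e => e.2.1))).filter
        (fun c => pvLastStatus log n c == "verified"))
    (g := fun n => (PySem.List.dedup ((log.filter (fun e => e.1 == n)).map (fun e => e.2.1))).filter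
        (fun c => pvLastStatus log n c == "error"))
    (h := fun n => (PySem.List.dedup ((log.filter (fun e => e.1 == n)).map (fun e => e.2.1))).filter
        (fun c => pvLastStatus log n c == "timed out"))
    ([], [], [])]
  -- A side: filter/map over the mapped items list
  have hitems : ∀ (n : String),
      (pvInnerOf (log.filter (fun e => e.1 == n))).items
        = (PySem.List.dedup ((log.filter (fun e => e.1 == n)).map (fun e => e.2.1))).map
            (fun c => (c, pvLastStatus log n c)) := by
    intro n
    rw [pvItems_innerOf]
    exact List.map_congr_left (fun c _ => by rw [pvLastStatus_filter])
  refine Prod.ext ?_ (Prod.ext ?_ ?_) <;>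
  · simp only [List.filter_map, List.map_map]
    rw [List.nil_append]
    congr 1
    · funext n
      simp only [Function.comp_def]
      rw [pvFilter_items _ (fun c => pvLastStatus log n c) _ _ (hitems n)]
    · refine List.filter_congr (fun n _ => ?_)
      simp only [Function.comp_def]
      first
      | rw [pvAll_values _ (fun c => pvLastStatus log n c) _ _ (hitems n)]
      | rw [pvAny_values _ (fun c => pvLastStatus log n c) _ _ (hitems n)]
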